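-- pv_equiv track=rewrite | github.com/leolech14/PROJECT_localbrain | 02_SPECBASES/specbase-obsidian-orchestra/obsidian-orchestra/SEMANTIC_SECTION_MAPPER.py | _classify_process_purpose
-- ===== SOURCE A (Python) =====
-- from typing import Dict, List, Any
--
-- def _classify_process_purpose(numbered_items: List[str]) -> str:
--     """Classify what a numbered process is actually describing"""
--
--     combined_items = ' '.join(numbered_items[:3]).lower()
--
--     if any(word in combined_items for word in ['install', 'setup', 'configure']):
--         return 'installation_procedure'
--     elif any(word in combined_items for word in ['implement', 'create', 'build']):
--         return 'implementation_procedure'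
--     elif any(word in combined_items for word in ['deploy', 'release', 'production']):
--         return 'deployment_procedure'
--     elif any(word in combined_items for word in ['test', 'validate', 'verify']):
--         return 'validation_procedure'
--     elif any(word in combined_items for word in ['user', 'login', 'signup']):
--         return 'user_workflow_steps'
--     else:
--         return 'sequential_process_steps'
-- ===== SOURCE B (Python) =====
-- from typing import List
--
-- # B: single left-to-right scan of the combined text. At each position we check which
-- # keyword starts there (via startswith with an offset) and keep the best (lowest)
-- # priority rank seen; the label is looked up from the rank at the end.
-- LABELS = ['installation_procedure', 'implementation_procedure', 'deployment_procedure',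
--           'validation_procedure', 'user_workflow_steps', 'sequential_process_steps']
-- KEYWORD_RANK = {'install': 0, 'setup': 0, 'configure': 0,
--                 'implement': 1, 'create': 1, 'build': 1,
--                 'deploy': 2, 'release': 2, 'production': 2,
--                 'test': 3, 'validate': 3, 'verify': 3,
--                 'user': 4, 'login': 4, 'signup': 4}
--
-- def _classify_process_purpose(numbered_items: List[str]) -> str:
--     text = ' '.join(numbered_items[:3]).lower()
--     best = 5
--     for i in range(len(text)):
--         for kw, rank in KEYWORD_RANK.items():
--             if rank < best and text.startswith(kw, i):
--                 best = rank
--     return LABELS[best]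
-- ===== Notes on version B (the rewrite author's own statement) =====
-- stated objective: alternative
-- what changed: Instead of testing each keyword for substring containment in an if/elif chain, B makes a single left-to-right scan over the combined text, at each offset checking which ranked keyword starts there (startswith with offset) and keeping the minimum rank, then maps the rank to its label.
import Mathlib
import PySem

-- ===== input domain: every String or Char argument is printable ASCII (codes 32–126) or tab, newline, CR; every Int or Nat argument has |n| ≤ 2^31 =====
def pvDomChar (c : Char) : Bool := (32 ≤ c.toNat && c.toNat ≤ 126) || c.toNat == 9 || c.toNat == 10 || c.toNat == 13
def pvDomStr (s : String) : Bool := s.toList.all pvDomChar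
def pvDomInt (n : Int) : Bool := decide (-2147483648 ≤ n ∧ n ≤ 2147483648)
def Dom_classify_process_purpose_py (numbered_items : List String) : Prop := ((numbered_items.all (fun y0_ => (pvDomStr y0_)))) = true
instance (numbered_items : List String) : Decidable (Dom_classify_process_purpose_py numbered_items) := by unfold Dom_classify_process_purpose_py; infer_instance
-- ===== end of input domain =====

-- B replaces the staged substring-containment if/elif chain by one positional scan of the text
-- that tracks the minimum matching keyword rank (alternative algorithm, same cost class).

-- ===== PORT A =====
def classify_process_purpose_py (numbered_items : List String) : String :=
  let combined_items := PySem.Str.lower (PySem.Str.join " " (PySem.List.slice numbered_items none (some 3)))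
  if ["install", "setup", "configure"].any (fun word => PySem.Str.isIn word combined_items) then
    "installation_procedure"
  else if ["implement", "create", "build"].any (fun word => PySem.Str.isIn word combined_items) then
    "implementation_procedure"
  else if ["deploy", "release", "production"].any (fun word => PySem.Str.isIn word combined_items) then
    "deployment_procedure"
  else if ["test", "validate", "verify"].any (fun word => PySem.Str.isIn word combined_items) then
    "validation_procedure"
  else if ["user", "login", "signup"].any (fun word => PySem.Str.isIn word combined_items) then
    "user_workflow_steps"
  else
    "sequential_process_steps"

-- ===== PORT B =====
def pvLabels : List String :=
  ["installation_procedure", "implementation_procedure", "deployment_procedure",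
   "validation_procedure", "user_workflow_steps", "sequential_process_steps"]

def pvKeywordRank : List (String × Nat) :=
  [("install", 0), ("setup", 0), ("configure", 0),
   ("implement", 1), ("create", 1), ("build", 1),
   ("deploy", 2), ("release", 2), ("production", 2),
   ("test", 3), ("validate", 3), ("verify", 3),
   ("user", 4), ("login", 4), ("signup", 4)]

-- Python's text.startswith(kw, i) with 0 ≤ i is ported by hand, exactly, as
-- kw.toList.isPrefixOf (text.toList.drop i).
def classify_process_purpose_py_alt (numbered_items : List String) : String :=
  let text := PySem.Str.lower (PySem.Str.join " " (PySem.List.slice numbered_items none (some 3)))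
  let cs := text.toList
  -- range(len(text)) is the list of valid offsets 0, …, len-1
  let best := (List.range cs.length).foldl
    (fun best i => pvKeywordRank.foldl
      (fun best kr => if kr.2 < best && kr.1.toList.isPrefixOf (cs.drop i) then kr.2 else best) best) 5
  -- LABELS[best]: best ≤ 5 always, so getD's default is never used
  pvLabels.getD best ""

-- ===== PRECONDITION & SPEC =====
def Spec_classify_process_purpose_py (numbered_items : List String) (out : String) : Prop := out = classify_process_purpose_py_alt numbered_items
instance (numbered_items : List String) (out : String) : Decidable (Spec_classify_process_purpose_py numbered_items out) := by unfold Spec_classify_process_purpose_py; infer_instance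

-- ===== CLAIM (what is proved, stated in full; the proofs are below) =====
def Claim_equal_classify_process_purpose_py : Prop := ∀ (numbered_items : List String), Dom_classify_process_purpose_py numbered_items → Spec_classify_process_purpose_py numbered_items (classify_process_purpose_py numbered_items)

-- ===== LEMMAS AND PROOFS =====

-- the multiset of ranks matched anywhere in cs (candidate list of B's double fold)
def pvCands (cs : List Char) : List Nat :=
  (List.range cs.length).flatMap (fun i =>
    pvKeywordRank.filterMap (fun kr => if kr.1.toList.isPrefixOf (cs.drop i) then some kr.2 else none))

-- B's inner fold over the rule table is a min-fold over the ranks matching at that offset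
theorem pv_inner_foldl (cs : List Char) (i : Nat) (l : List (String × Nat)) (b : Nat) :
    l.foldl (fun best kr => if kr.2 < best && kr.1.toList.isPrefixOf (cs.drop i) then kr.2 else best) b
      = (l.filterMap (fun kr => if kr.1.toList.isPrefixOf (cs.drop i) then some kr.2 else none)).foldl min b := by
  induction l generalizing b with
  | nil => rfl
  | cons a t ih =>
      by_cases h : a.1.toList.isPrefixOf (cs.drop i) = true
      · have hmin : (if a.2 < b && a.1.toList.isPrefixOf (cs.drop i) then a.2 else b) = min b a.2 := by
          rcases Nat.lt_or_ge a.2 b with hlt | hge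
          · rw [if_pos (by simp [h, hlt])]; omega
          · rw [if_neg (by simp [h]; omega)]; omega
        have e1 : (if a.1.toList.isPrefixOf (cs.drop i) = true then some a.2 else none) = some a.2 := by
          simp [h]
        rw [List.foldl_cons, List.filterMap_cons, e1, List.foldl_cons, hmin]
        exact ih _
      · have hb : (if a.2 < b && a.1.toList.isPrefixOf (cs.drop i) then a.2 else b) = b := by
          simp [h]
        have e1 : (if a.1.toList.isPrefixOf (cs.drop i) = true then some a.2 else none) = none := by
          simp [h]
        rw [List.foldl_cons, List.filterMap_cons, e1, hb]
        exact ih _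

theorem pv_outer (cs : List Char) (xs : List Nat) (b : Nat) :
    xs.foldl (fun best i => (pvKeywordRank.filterMap
        (fun kr => if kr.1.toList.isPrefixOf (cs.drop i) then some kr.2 else none)).foldl min best) b
      = (xs.flatMap (fun i => pvKeywordRank.filterMap
          (fun kr => if kr.1.toList.isPrefixOf (cs.drop i) then some kr.2 else none))).foldl min b := by
  induction xs generalizing b with
  | nil => simp only [List.foldl_nil, List.flatMap_nil]
  | cons a t ih =>
      simp only [List.foldl_cons, List.flatMap_cons, List.foldl_append]
      exact ih _

-- B's double fold is the min-fold over the flattened candidate list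
theorem pv_both (cs : List Char) (xs : List Nat) (b : Nat) :
    xs.foldl (fun best i => pvKeywordRank.foldl
      (fun best kr => if kr.2 < best && kr.1.toList.isPrefixOf (cs.drop i) then kr.2 else best) best) b
      = (xs.flatMap (fun i => pvKeywordRank.filterMap
          (fun kr => if kr.1.toList.isPrefixOf (cs.drop i) then some kr.2 else none))).foldl min b := by
  simp only [pv_inner_foldl]
  exact pv_outer cs xs b

theorem pv_foldl_min_cases (L : List Nat) (b : Nat) :
    L.foldl min b = b ∨ L.foldl min b ∈ L := by
  induction L generalizing b with
  | nil => exact Or.inl rfl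
  | cons a t ih =>
      simp only [List.foldl_cons, List.mem_cons]
      rcases ih (min b a) with h | h
      · rcases Nat.le_total b a with hba | hba
        · rw [Nat.min_eq_left hba] at h ⊢; exact Or.inl h
        · rw [Nat.min_eq_right hba] at h ⊢; exact Or.inr (Or.inl h)
      · exact Or.inr (Or.inr h)

theorem pv_foldl_min_le_init (L : List Nat) (b : Nat) : L.foldl min b ≤ b := by
  induction L generalizing b with
  | nil => exact le_rfl
  | cons a t ih => exact le_trans (ih (min b a)) (Nat.min_le_left _ _)

theorem pv_foldl_min_le_mem (L : List Nat) : ∀ b r : Nat, r ∈ L → L.foldl min b ≤ r := by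
  induction L with
  | nil => intro b r h; cases h
  | cons a t ih =>
      intro b r h
      rw [List.foldl_cons]
      rcases List.mem_cons.mp h with rfl | h2
      · exact le_trans (pv_foldl_min_le_init t (min b r)) (Nat.min_le_right _ _)
      · exact ih _ r h2

-- membership in the candidate list = some table keyword of that rank occurs in cs
theorem pv_mem_cands (cs : List Char) (r : Nat) :
    r ∈ pvCands cs ↔ ∃ kr ∈ pvKeywordRank, kr.2 = r ∧ PySem.Chars.isIn kr.1.toList cs = true := by
  have hne : ∀ kr ∈ pvKeywordRank, kr.1.toList ≠ [] := by decide
  constructor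
  · rintro h
    simp only [pvCands, List.mem_flatMap, List.mem_range, List.mem_filterMap] at h
    obtain ⟨i, _, kr, hkr, hif⟩ := h
    by_cases hp : kr.1.toList.isPrefixOf (cs.drop i) = true
    · refine ⟨kr, hkr, ?_, ?_⟩
      · simpa [hp] using hif
      · exact (PySem.Chars.exists_prefix_drop_iff_isIn _ _).mp ⟨i, List.isPrefixOf_iff_prefix.mp hp⟩
    · simp [hp] at hif
  · rintro ⟨kr, hkr, rfl, hin⟩
    obtain ⟨j, hj⟩ := (PySem.Chars.exists_prefix_drop_iff_isIn _ _).mpr hin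
    have hjlt : j < cs.length := by
      by_contra hge
      have hnil : cs.drop j = [] := List.drop_eq_nil_of_le (by omega)
      rw [hnil] at hj
      exact hne kr hkr (List.prefix_nil.mp hj)
    simp only [pvCands, List.mem_flatMap, List.mem_range, List.mem_filterMap]
    exact ⟨j, hjlt, kr, hkr, by simp [List.isPrefixOf_iff_prefix.mpr hj]⟩

theorem pv_cands_le (cs : List Char) (r : Nat) (h : r ∈ pvCands cs) : r ≤ 4 := by
  obtain ⟨kr, hkr, rfl, -⟩ := (pv_mem_cands cs r).mp h
  fin_cases hkr <;> simp

-- ===== VERDICT (by name: the statement is the Claim_ definition above) =====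
set_option maxHeartbeats 1000000 in
theorem classify_process_purpose_py_spec : Claim_equal_classify_process_purpose_py := by
  intro numbered_items _
  unfold Spec_classify_process_purpose_py
  simp only [classify_process_purpose_py, classify_process_purpose_py_alt]
  set text := PySem.Str.lower (PySem.Str.join " " (PySem.List.slice numbered_items none (some 3))) with htext
  set cs := text.toList with hcs
  have hbest : (List.range cs.length).foldl
      (fun best i => pvKeywordRank.foldl
        (fun best kr => if kr.2 < best && kr.1.toList.isPrefixOf (cs.drop i) then kr.2 else best) best) 5
      = (pvCands cs).foldl min 5 := by
    unfold pvCands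
    exact pv_both cs (List.range cs.length) 5
  rw [hbest]
  set best := (pvCands cs).foldl min 5 with hbdef
  have h0 : (0 ∈ pvCands cs) ↔
      (["install", "setup", "configure"].any (fun word => PySem.Str.isIn word text) = true) := by
    rw [pv_mem_cands]
    simp only [pvKeywordRank, List.mem_cons, List.not_mem_nil, or_false,
      List.any_cons, List.any_nil, Bool.or_eq_true, Bool.false_eq_true, PySem.Str.isIn_eq, hcs]
    constructor
    · rintro ⟨kr, hm, hr, hin⟩
      rcases hm with rfl|rfl|rfl|rfl|rfl|rfl|rfl|rfl|rfl|rfl|rfl|rfl|rfl|rfl|rfl <;> simp_all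
    · rintro (h|h|h)
      · exact ⟨("install", 0), by simp, rfl, h⟩
      · exact ⟨("setup", 0), by simp, rfl, h⟩
      · exact ⟨("configure", 0), by simp, rfl, h⟩
  have h1 : (1 ∈ pvCands cs) ↔
      (["implement", "create", "build"].any (fun word => PySem.Str.isIn word text) = true) := by
    rw [pv_mem_cands]
    simp only [pvKeywordRank, List.mem_cons, List.not_mem_nil, or_false,
      List.any_cons, List.any_nil, Bool.or_eq_true, Bool.false_eq_true, PySem.Str.isIn_eq, hcs]
    constructor
    · rintro ⟨kr, hm, hr, hin⟩
      rcases hm with rfl|rfl|rfl|rfl|rfl|rfl|rfl|rfl|rfl|rfl|rfl|rfl|rfl|rfl|rfl <;> simp_all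
    · rintro (h|h|h)
      · exact ⟨("implement", 1), by simp, rfl, h⟩
      · exact ⟨("create", 1), by simp, rfl, h⟩
      · exact ⟨("build", 1), by simp, rfl, h⟩
  have h2 : (2 ∈ pvCands cs) ↔
      (["deploy", "release", "production"].any (fun word => PySem.Str.isIn word text) = true) := by
    rw [pv_mem_cands]
    simp only [pvKeywordRank, List.mem_cons, List.not_mem_nil, or_false,
      List.any_cons, List.any_nil, Bool.or_eq_true, Bool.false_eq_true, PySem.Str.isIn_eq, hcs]
    constructor
    · rintro ⟨kr, hm, hr, hin⟩
      rcases hm with rfl|rfl|rfl|rfl|rfl|rfl|rfl|rfl|rfl|rfl|rfl|rfl|rfl|rfl|rfl <;> simp_all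
    · rintro (h|h|h)
      · exact ⟨("deploy", 2), by simp, rfl, h⟩
      · exact ⟨("release", 2), by simp, rfl, h⟩
      · exact ⟨("production", 2), by simp, rfl, h⟩
  have h3 : (3 ∈ pvCands cs) ↔
      (["test", "validate", "verify"].any (fun word => PySem.Str.isIn word text) = true) := by
    rw [pv_mem_cands]
    simp only [pvKeywordRank, List.mem_cons, List.not_mem_nil, or_false,
      List.any_cons, List.any_nil, Bool.or_eq_true, Bool.false_eq_true, PySem.Str.isIn_eq, hcs]
    constructor
    · rintro ⟨kr, hm, hr, hin⟩
      rcases hm with rfl|rfl|rfl|rfl|rfl|rfl|rfl|rfl|rfl|rfl|rfl|rfl|rfl|rfl|rfl <;> simp_all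
    · rintro (h|h|h)
      · exact ⟨("test", 3), by simp, rfl, h⟩
      · exact ⟨("validate", 3), by simp, rfl, h⟩
      · exact ⟨("verify", 3), by simp, rfl, h⟩
  have h4 : (4 ∈ pvCands cs) ↔
      (["user", "login", "signup"].any (fun word => PySem.Str.isIn word text) = true) := by
    rw [pv_mem_cands]
    simp only [pvKeywordRank, List.mem_cons, List.not_mem_nil, or_false,
      List.any_cons, List.any_nil, Bool.or_eq_true, Bool.false_eq_true, PySem.Str.isIn_eq, hcs]
    constructor
    · rintro ⟨kr, hm, hr, hin⟩
      rcases hm with rfl|rfl|rfl|rfl|rfl|rfl|rfl|rfl|rfl|rfl|rfl|rfl|rfl|rfl|rfl <;> simp_all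
    · rintro (h|h|h)
      · exact ⟨("user", 4), by simp, rfl, h⟩
      · exact ⟨("login", 4), by simp, rfl, h⟩
      · exact ⟨("signup", 4), by simp, rfl, h⟩
  have hcases := pv_foldl_min_cases (pvCands cs) 5
  rw [← hbdef] at hcases
  have hlemem : ∀ r ∈ pvCands cs, best ≤ r := fun r hr => pv_foldl_min_le_mem _ _ _ hr
  split_ifs with c0 c1 c2 c3 c4
  · have hb : best = 0 := Nat.le_zero.mp (hlemem 0 (h0.mpr c0))
    simp [hb, pvLabels]
  · have hle : best ≤ 1 := hlemem 1 (h1.mpr c1)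
    have hb : best = 1 := by
      rcases hcases with h | h
      · omega
      · interval_cases best
        · exact absurd (h0.mp h) c0
        · rfl
    simp [hb, pvLabels]
  · have hle : best ≤ 2 := hlemem 2 (h2.mpr c2)
    have hb : best = 2 := by
      rcases hcases with h | h
      · omega
      · interval_cases best
        · exact absurd (h0.mp h) c0
        · exact absurd (h1.mp h) c1
        · rfl
    simp [hb, pvLabels]
  · have hle : best ≤ 3 := hlemem 3 (h3.mpr c3)
    have hb : best = 3 := by
      rcases hcases with h | h
      · omega
      · interval_cases best
        · exact absurd (h0.mp h) c0
        · exact absurd (h1.mp h) c1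
        · exact absurd (h2.mp h) c2
        · rfl
    simp [hb, pvLabels]
  · have hle : best ≤ 4 := hlemem 4 (h4.mpr c4)
    have hb : best = 4 := by
      rcases hcases with h | h
      · omega
      · interval_cases best
        · exact absurd (h0.mp h) c0
        · exact absurd (h1.mp h) c1
        · exact absurd (h2.mp h) c2
        · exact absurd (h3.mp h) c3
        · rfl
    simp [hb, pvLabels]
  · have hb : best = 5 := by
      rcases hcases with h | h
      · exact h
      · have hle4 := pv_cands_le cs best h
        interval_cases best
        · exact absurd (h0.mp h) c0
        · exact absurd (h1.mp h) c1
        · exact absurd (h2.mp h) c2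
        · exact absurd (h3.mp h) c3
        · exact absurd (h4.mp h) c4
    simp [hb, pvLabels]
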